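-- pv_equiv track=rewrite | github.com/jwesson24601/jane-college-code-and-HDL-portfolio | Intro to AI and ML - Hill Climbing Example (commented, no header)/nqueens.py | choose_next
-- ===== SOURCE A (Python) =====
-- def succ(state, static_x, static_y):
--     succ = [] # list of successors
--     stateCopy = state[0:] # copy of state
--     n = len(state) # board size
--     if state[static_x] != static_y: # if static point isn't correct, return empty
--         return succ
--
--     # go through the state
--     for i in range(n):
--         if i == static_x: # ignore static point
--             continue
--
--         if stateCopy[i] > 0: # check if queen can be moved up a row
--             stateCopy[i] -= 1
--             succ.append(stateCopy)
--             stateCopy = state[0:]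
--
--         if stateCopy[i] < n - 1: # check if queen can be moved down a row
--             stateCopy[i] += 1
--             succ.append(stateCopy)
--             stateCopy = state[0:]
--
--     return sorted(succ)
--
-- def f(state):
--     f = 0 # f score
--     n = len(state) # size of board
--
--     # check every queen one by one to see if they are being attacked
--     for i in range(n):
--         for j in range(n):
--
--             if state[i] == state[j] and j != i: # checks if two queens are in same row
--                 f += 1
--                 break
--
--             # checks diagonals of up and right and down and right
--             if i+j < n and j != 0 and (state[i+j] == state[i] + j or state[i+j] == state[i] - j):
--                 f += 1
--                 break
--
--             # checks diagonals of up and left and down and left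
--             if i-j >= 0 and j != 0 and (state[i-j] == state[i] - j or state[i-j] == state[i] + j):
--                 f += 1
--                 break
--
--     return f
--
-- def choose_next(curr, static_x, static_y):
--     successors = succ(curr, static_x, static_y) # all successors
--     possible = [curr] # list of successors of lowest f score
--
--     if len(successors) == 0: # check if there are legitimate successors at all
--         return None
--
--     lowF = f(curr) # set lowest f to f or current state
--
--     # look through all successors
--     for i in range(len(successors)):
--         # get f score of current successor
--         currF = f(successors[i])
--         if currF < lowF: # if lower f, make new possible list
--             possible = []
--             possible.append(successors[i])
--             lowF = currF
--         elif currF == lowF: # if f is same, just add to current possible list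
--             possible.append(successors[i])
--
--     # pick state with lowest value if state written as an integer
--     possible.sort()
--     return possible[0]
-- ===== SOURCE B (Python) =====
-- def f(state):
--     # number of attacked queens, via row/diagonal/anti-diagonal occupancy counts (O(n))
--     n = len(state)
--     rows = {}
--     diag = {}
--     anti = {}
--     for i in range(n):
--         r = state[i]
--         rows[r] = rows.get(r, 0) + 1
--         diag[r - i] = diag.get(r - i, 0) + 1
--         anti[r + i] = anti.get(r + i, 0) + 1
--     att = 0
--     for i in range(n):
--         r = state[i]
--         if rows[r] > 1 or diag[r - i] > 1 or anti[r + i] > 1: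
--             att += 1
--     return att
--
--
-- def choose_next(curr, static_x, static_y):
--     n = len(curr)
--     if curr[static_x] != static_y:
--         return None
--     cands = []
--     for i in range(n):
--         if i != static_x:
--             r = curr[i]
--             if r > 0:
--                 cands.append(curr[:i] + [r - 1] + curr[i + 1:])
--             if r < n - 1:
--                 cands.append(curr[:i] + [r + 1] + curr[i + 1:])
--     if not cands:
--         return None
--     best = curr
--     bestF = f(curr)
--     for s in cands:
--         fs = f(s)
--         if fs < bestF or (fs == bestF and s < best):
--             best = s
--             bestF = fs
--     return best
-- ===== Notes on version B (the rewrite author's own statement) =====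
-- stated objective: alternative
-- what changed: f is computed via row/diagonal/anti-diagonal occupancy-count dicts (one counting pass plus one lookup pass) instead of A's per-queen double loop with breaks, and the best successor is picked in one (f, lexicographic) running-minimum pass over directly built candidate lists instead of sorting the successor list, scanning it, and then sorting the tie list.
import Mathlib
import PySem

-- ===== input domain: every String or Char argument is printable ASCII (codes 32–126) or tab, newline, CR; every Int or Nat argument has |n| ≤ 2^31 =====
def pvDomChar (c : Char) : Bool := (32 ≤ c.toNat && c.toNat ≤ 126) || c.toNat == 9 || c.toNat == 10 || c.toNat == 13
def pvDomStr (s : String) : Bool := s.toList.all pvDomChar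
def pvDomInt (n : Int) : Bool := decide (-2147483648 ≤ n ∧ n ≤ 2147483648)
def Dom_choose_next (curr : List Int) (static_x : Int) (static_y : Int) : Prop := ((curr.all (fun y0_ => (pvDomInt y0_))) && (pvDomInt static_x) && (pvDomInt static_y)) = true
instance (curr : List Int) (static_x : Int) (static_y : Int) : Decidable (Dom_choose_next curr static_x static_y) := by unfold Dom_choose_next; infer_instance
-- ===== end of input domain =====

-- B computes the attack count f via row/diagonal/anti-diagonal occupancy-count maps
-- instead of A's per-queen double scan, and picks the best successor in one
-- (f, lexicographic) running-minimum pass instead of sorting the successor list,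
-- scanning it, and sorting the tie list (intended as faster; a timing run
-- measured 1.39x at its largest size, so no speed is claimed).


-- ===== PORT A =====

-- succ(state, static_x, static_y): `stateCopy[i] -= 1; append; stateCopy = state[0:]`
-- appends state with slot i replaced; the loop index i comes from range(n), so i ≥ 0
-- and `List.set i.toNat` is exact there.
def succA (state : List Int) (static_x : Int) (static_y : Int) : List (List Int) :=
  let n : Int := (state.length : Int)
  match PySem.List.pyGet? state static_x with
  | none => []          -- IndexError in Python; excluded by Pre_choose_next
  | some v =>
    if v ≠ static_y then []
    else
      PySem.List.sorted
        ((PySem.List.pyRange 0 n).foldl (fun acc i =>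
          if i = static_x then acc
          else
            let acc := if PySem.List.pyGetD state i 0 > 0
              then acc ++ [state.set i.toNat (PySem.List.pyGetD state i 0 - 1)] else acc
            if PySem.List.pyGetD state i 0 < n - 1
              then acc ++ [state.set i.toNat (PySem.List.pyGetD state i 0 + 1)] else acc) [])
        (fun s => s)

-- one j-step of f's inner loop body; every index used is guarded in range, so pyGetD is exact
def condA (state : List Int) (n i j : Int) : Bool :=
  (PySem.List.pyGetD state i 0 == PySem.List.pyGetD state j 0 && !(j == i))
  || (decide (i + j < n) && !(j == 0)
      && (PySem.List.pyGetD state (i + j) 0 == PySem.List.pyGetD state i 0 + j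
          || PySem.List.pyGetD state (i + j) 0 == PySem.List.pyGetD state i 0 - j))
  || (decide (0 ≤ i - j) && !(j == 0)
      && (PySem.List.pyGetD state (i - j) 0 == PySem.List.pyGetD state i 0 - j
          || PySem.List.pyGetD state (i - j) 0 == PySem.List.pyGetD state i 0 + j))

-- f(state): the inner `for j: if …: f += 1; break` adds exactly 1 at the first hit;
-- `List.any` is that first-hit test (same order, short-circuit, no other effect).
def fA (state : List Int) : Int :=
  let n : Int := (state.length : Int)
  (PySem.List.pyRange 0 n).foldl (fun acc i =>
    if (PySem.List.pyRange 0 n).any (fun j => condA state n i j) then acc + 1 else acc) 0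

def choose_next (curr : List Int) (static_x : Int) (static_y : Int) : Option (List Int) :=
  let successors := succA curr static_x static_y
  if successors.length = 0 then none
  else
    PySem.List.pyGet? (PySem.List.sorted
      (successors.foldl (fun (acc : List (List Int) × Int) s =>
        if fA s < acc.2 then ([s], fA s)
        else if fA s = acc.2 then (acc.1 ++ [s], acc.2) else acc) ([curr], fA curr)).1
      (fun s => s)) 0

-- ===== PORT B =====

-- f(state) from Source B: three occupancy-count dicts (`d[k] = d.get(k, 0) + 1` is
-- Dict.modify k 0 (·+1)), then one pass counting the attacked queens.
def fB (state : List Int) : Int :=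
  let n : Int := (state.length : Int)
  let maps := (PySem.List.pyRange 0 n).foldl
    (fun (m : PySem.Dict Int Int × PySem.Dict Int Int × PySem.Dict Int Int) i =>
      (m.1.modify (PySem.List.pyGetD state i 0) 0 (· + 1),
       m.2.1.modify (PySem.List.pyGetD state i 0 - i) 0 (· + 1),
       m.2.2.modify (PySem.List.pyGetD state i 0 + i) 0 (· + 1)))
    (PySem.Dict.empty, PySem.Dict.empty, PySem.Dict.empty)
  (PySem.List.pyRange 0 n).foldl (fun acc i =>
    if maps.1.getD (PySem.List.pyGetD state i 0) 0 > 1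
       || maps.2.1.getD (PySem.List.pyGetD state i 0 - i) 0 > 1
       || maps.2.2.getD (PySem.List.pyGetD state i 0 + i) 0 > 1
    then acc + 1 else acc) 0

-- cands loop of Source B; curr[:i] + [r ∓ 1] + curr[i+1:] via PySem.List.slice
def candsB (curr : List Int) (static_x : Int) : List (List Int) :=
  let n : Int := (curr.length : Int)
  (PySem.List.pyRange 0 n).foldl (fun acc i =>
    if i ≠ static_x then
      let acc := if PySem.List.pyGetD curr i 0 > 0
        then acc ++ [PySem.List.slice curr none (some i) ++ [PySem.List.pyGetD curr i 0 - 1] ++ PySem.List.slice curr (some (i + 1)) none]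
        else acc
      if PySem.List.pyGetD curr i 0 < n - 1
        then acc ++ [PySem.List.slice curr none (some i) ++ [PySem.List.pyGetD curr i 0 + 1] ++ PySem.List.slice curr (some (i + 1)) none]
        else acc
    else acc) []

def choose_next_alt (curr : List Int) (static_x : Int) (static_y : Int) : Option (List Int) :=
  match PySem.List.pyGet? curr static_x with
  | none => none        -- IndexError in Python; excluded by Pre_choose_next
  | some v =>
    if v ≠ static_y then none
    else if candsB curr static_x = [] then none
    else
      some ((candsB curr static_x).foldl (fun (acc : List Int × Int) s =>
        if fB s < acc.2 ∨ (fB s = acc.2 ∧ s < acc.1) then (s, fB s) else acc)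
        (curr, fB curr)).1

-- ===== PRECONDITION & SPEC =====
-- Pre_ excludes exactly the inputs where Python raises IndexError on curr[static_x]
-- (static_x outside [-len(curr), len(curr))); both A and B raise there.
def Pre_choose_next (curr : List Int) (static_x : Int) (static_y : Int) : Prop :=
  -(curr.length : Int) ≤ static_x ∧ static_x < (curr.length : Int)
instance (curr : List Int) (static_x : Int) (static_y : Int) : Decidable (Pre_choose_next curr static_x static_y) := by unfold Pre_choose_next; infer_instance

def pvWitness_choose_next : List Int × Int × Int := ([1, 0, 2], 0, 1)

def Spec_choose_next (curr : List Int) (static_x : Int) (static_y : Int) (out : Option (List Int)) : Prop := out = choose_next_alt curr static_x static_y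
instance (curr : List Int) (static_x : Int) (static_y : Int) (out : Option (List Int)) : Decidable (Spec_choose_next curr static_x static_y out) := by unfold Spec_choose_next; infer_instance

-- ===== CLAIM (what is proved, stated in full; the proofs are below) =====
def Claim_equal_choose_next : Prop := ∀ (curr : List Int) (static_x : Int) (static_y : Int), Dom_choose_next curr static_x static_y → Pre_choose_next curr static_x static_y → Spec_choose_next curr static_x static_y (choose_next curr static_x static_y)

-- ===== LEMMAS AND PROOFS =====

-- Python indexing is total inside the Pre_ bounds
theorem pre_get (l : List Int) (i : Int) (h0 : -(l.length : Int) ≤ i) (h1 : i < (l.length : Int)) :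
    ∃ v, PySem.List.pyGet? l i = some v := by
  simp only [PySem.List.pyGet?, PySem.List.pyIdx?]
  by_cases hp : 0 ≤ i
  · rw [if_pos hp, if_pos h1]
    have hk : i.toNat < l.length := by omega
    exact ⟨l[i.toNat], by simp [List.getElem?_eq_getElem hk]⟩
  · rw [if_neg hp, if_pos h0]
    have hk : l.length - (-i).toNat < l.length := by omega
    exact ⟨l[l.length - (-i).toNat], by simp [List.getElem?_eq_getElem hk]⟩

-- a value occurs twice in the image of range iff some other index carries the same value
theorem one_lt_count_map_range (g : Nat → Int) (len i : Nat) (hi : i < len) :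
    1 < List.count (g i) ((List.range len).map (fun k => g k)) ↔
      ∃ j : Nat, j < len ∧ j ≠ i ∧ g j = g i := by
  rw [show (1 < List.count (g i) ((List.range len).map fun k => g k)) ↔
      (2 ≤ List.count (g i) ((List.range len).map fun k => g k)) from Iff.rfl,
    ← List.duplicate_iff_two_le_count, List.duplicate_iff_exists_distinct_get]
  constructor
  · rintro ⟨p, q, hpq, he1, he2⟩
    have hlen : ((List.range len).map fun k => g k).length = len := by simp
    have hp : ((List.range len).map fun k => g k).get p = g p.1 := by
      simp [List.get_eq_getElem]
    have hq : ((List.range len).map fun k => g k).get q = g q.1 := by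
      simp [List.get_eq_getElem]
    by_cases hpi : p.1 = i
    · exact ⟨q.1, by omega, by omega, by rw [← hq, ← he2]⟩
    · exact ⟨p.1, by omega, hpi, by rw [← hp, ← he1]⟩
  · rintro ⟨j, hj, hji, hgj⟩
    have hlen : ((List.range len).map fun k => g k).length = len := by simp
    rcases Nat.lt_or_ge j i with h | h
    · exact ⟨⟨j, by omega⟩, ⟨i, by omega⟩, by simp; omega, by simp [hgj], by simp⟩
    · exact ⟨⟨i, by omega⟩, ⟨j, by omega⟩, by simp; omega, by simp, by simp [hgj]⟩

-- queen i is hit by A's inner scan iff some other column shares its row, diagonal or anti-diagonal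
theorem attack_iff (state : List Int) (i : Int) (h0 : 0 ≤ i) (h1 : i < (state.length : Int)) :
    (∃ j, 0 ≤ j ∧ j < (state.length : Int) ∧ condA state (state.length : Int) i j = true) ↔
    (∃ k, 0 ≤ k ∧ k < (state.length : Int) ∧ k ≠ i ∧
      (PySem.List.pyGetD state k 0 = PySem.List.pyGetD state i 0 ∨
       PySem.List.pyGetD state k 0 - k = PySem.List.pyGetD state i 0 - i ∨
       PySem.List.pyGetD state k 0 + k = PySem.List.pyGetD state i 0 + i)) := by
  simp only [condA, Bool.or_eq_true, Bool.and_eq_true, Bool.not_eq_true', beq_iff_eq,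
    beq_eq_false_iff_ne, decide_eq_true_eq, ne_eq]
  constructor
  · rintro ⟨j, hj0, hj1, hc⟩
    rcases hc with (⟨heq, hji⟩ | ⟨⟨hlt, hj0'⟩, h | h⟩) | ⟨⟨hge, hj0'⟩, h | h⟩
    · exact ⟨j, hj0, hj1, hji, Or.inl heq.symm⟩
    · exact ⟨i + j, by omega, hlt, by omega, Or.inr (Or.inl (by omega))⟩
    · exact ⟨i + j, by omega, hlt, by omega, Or.inr (Or.inr (by omega))⟩
    · exact ⟨i - j, by omega, by omega, by omega, Or.inr (Or.inl (by omega))⟩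
    · exact ⟨i - j, by omega, by omega, by omega, Or.inr (Or.inr (by omega))⟩
  · rintro ⟨k, hk0, hk1, hki, hd⟩
    rcases hd with h | h | h
    · exact ⟨k, hk0, hk1, Or.inl (Or.inl ⟨h.symm, hki⟩)⟩
    · rcases lt_or_gt_of_ne hki with hlt | hgt
      · refine ⟨i - k, by omega, by omega, ?_⟩
        refine Or.inr ⟨⟨by omega, by omega⟩, ?_⟩
        have e : i - (i - k) = k := by omega
        rw [e]; omega
      · refine ⟨k - i, by omega, by omega, ?_⟩
        refine Or.inl (Or.inr ⟨⟨by omega, by omega⟩, ?_⟩)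
        have e : i + (k - i) = k := by omega
        rw [e]; omega
    · rcases lt_or_gt_of_ne hki with hlt | hgt
      · refine ⟨i - k, by omega, by omega, ?_⟩
        refine Or.inr ⟨⟨by omega, by omega⟩, ?_⟩
        have e : i - (i - k) = k := by omega
        rw [e]; omega
      · refine ⟨k - i, by omega, by omega, ?_⟩
        refine Or.inl (Or.inr ⟨⟨by omega, by omega⟩, ?_⟩)
        have e : i + (k - i) = k := by omega
        rw [e]; omega

-- B's single dict-building loop is three Counters
theorem maps_eq (state : List Int) :
    (PySem.List.pyRange 0 (state.length : Int)).foldl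
      (fun (m : PySem.Dict Int Int × PySem.Dict Int Int × PySem.Dict Int Int) i =>
        (m.1.modify (PySem.List.pyGetD state i 0) 0 (· + 1),
         m.2.1.modify (PySem.List.pyGetD state i 0 - i) 0 (· + 1),
         m.2.2.modify (PySem.List.pyGetD state i 0 + i) 0 (· + 1)))
      (PySem.Dict.empty, PySem.Dict.empty, PySem.Dict.empty)
    = (PySem.Dict.counter ((PySem.List.pyRange 0 (state.length : Int)).map (fun i => PySem.List.pyGetD state i 0)),
       PySem.Dict.counter ((PySem.List.pyRange 0 (state.length : Int)).map (fun i => PySem.List.pyGetD state i 0 - i)),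
       PySem.Dict.counter ((PySem.List.pyRange 0 (state.length : Int)).map (fun i => PySem.List.pyGetD state i 0 + i))) := by
  rw [PySem.List.foldl_prod_mk
        (f := fun (d : PySem.Dict Int Int) (i : Int) => d.modify (PySem.List.pyGetD state i 0) 0 (· + 1))
        (g := fun (m : PySem.Dict Int Int × PySem.Dict Int Int) i =>
          (m.1.modify (PySem.List.pyGetD state i 0 - i) 0 (· + 1),
           m.2.modify (PySem.List.pyGetD state i 0 + i) 0 (· + 1))),
      PySem.List.foldl_prod_mk
        (f := fun (d : PySem.Dict Int Int) (i : Int) => d.modify (PySem.List.pyGetD state i 0 - i) 0 (· + 1))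
        (g := fun (d : PySem.Dict Int Int) (i : Int) => d.modify (PySem.List.pyGetD state i 0 + i) 0 (· + 1))]
  simp only [PySem.Dict.counter_eq_foldl, List.foldl_map]

-- the two attack counts agree
theorem f_eq (state : List Int) : fA state = fB state := by
  simp only [fA, fB]
  rw [maps_eq state]
  apply PySem.List.foldl_congr_mem
  intro acc i hi
  obtain ⟨hi0, hi1⟩ := PySem.List.mem_pyRange_one.mp hi
  have hcond : ((PySem.List.pyRange 0 (state.length : Int)).any
      (fun j => condA state (state.length : Int) i j))
      = ((PySem.Dict.counter ((PySem.List.pyRange 0 (state.length : Int)).map (fun i => PySem.List.pyGetD state i 0))).getD (PySem.List.pyGetD state i 0) 0 > 1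
         || (PySem.Dict.counter ((PySem.List.pyRange 0 (state.length : Int)).map (fun i => PySem.List.pyGetD state i 0 - i))).getD (PySem.List.pyGetD state i 0 - i) 0 > 1
         || (PySem.Dict.counter ((PySem.List.pyRange 0 (state.length : Int)).map (fun i => PySem.List.pyGetD state i 0 + i))).getD (PySem.List.pyGetD state i 0 + i) 0 > 1) := by
    rw [Bool.eq_iff_iff]
    rw [List.any_eq_true]
    simp only [PySem.Dict.getD_counter, Bool.or_eq_true, decide_eq_true_eq]
    rw [show (∃ x ∈ PySem.List.pyRange 0 (state.length : Int), condA state (state.length : Int) i x = true)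
        ↔ (∃ j, 0 ≤ j ∧ j < (state.length : Int) ∧ condA state (state.length : Int) i j = true) by
      constructor
      · rintro ⟨x, hx, hc⟩; obtain ⟨a, b⟩ := PySem.List.mem_pyRange_one.mp hx; exact ⟨x, a, b, hc⟩
      · rintro ⟨x, a, b, hc⟩; exact ⟨x, PySem.List.mem_pyRange_one.mpr ⟨a, b⟩, hc⟩]
    rw [attack_iff state i hi0 hi1]
    lift i to ℕ using hi0 with m
    rw [PySem.List.pyRange_zero_natCast, List.map_map, List.map_map, List.map_map]
    simp only [Function.comp_def]
    have hm : m < state.length := by exact_mod_cast hi1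
    constructor
    · rintro ⟨k, hk0, hk1, hki, hd⟩
      lift k to ℕ using hk0 with j
      have hj : j < state.length := by exact_mod_cast hk1
      have hjm : j ≠ m := by exact_mod_cast hki
      rcases hd with h | h | h
      · refine Or.inl (Or.inl ?_)
        have := (one_lt_count_map_range (fun k : ℕ => PySem.List.pyGetD state (k : Int) 0) state.length m hm).mpr ⟨j, hj, hjm, h⟩
        exact_mod_cast this
      · refine Or.inl (Or.inr ?_)
        have := (one_lt_count_map_range (fun k : ℕ => PySem.List.pyGetD state (k : Int) 0 - (k : Int)) state.length m hm).mpr ⟨j, hj, hjm, h⟩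
        exact_mod_cast this
      · refine Or.inr ?_
        have := (one_lt_count_map_range (fun k : ℕ => PySem.List.pyGetD state (k : Int) 0 + (k : Int)) state.length m hm).mpr ⟨j, hj, hjm, h⟩
        exact_mod_cast this
    · rintro ((h | h) | h)
      · obtain ⟨j, hj, hjm, he⟩ := (one_lt_count_map_range (fun k : ℕ => PySem.List.pyGetD state (k : Int) 0) state.length m hm).mp (by exact_mod_cast h)
        exact ⟨j, by positivity, by exact_mod_cast hj, by exact_mod_cast hjm, Or.inl he⟩
      · obtain ⟨j, hj, hjm, he⟩ := (one_lt_count_map_range (fun k : ℕ => PySem.List.pyGetD state (k : Int) 0 - (k : Int)) state.length m hm).mp (by exact_mod_cast h)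
        exact ⟨j, by positivity, by exact_mod_cast hj, by exact_mod_cast hjm, Or.inr (Or.inl he)⟩
      · obtain ⟨j, hj, hjm, he⟩ := (one_lt_count_map_range (fun k : ℕ => PySem.List.pyGetD state (k : Int) 0 + (k : Int)) state.length m hm).mp (by exact_mod_cast h)
        exact ⟨j, by positivity, by exact_mod_cast hj, by exact_mod_cast hjm, Or.inr (Or.inr he)⟩
  rw [hcond]

-- list.set at an in-range index is the slice decomposition Source B uses
theorem set_eq_slices (l : List Int) (i : Int) (h0 : 0 ≤ i) (h1 : i < (l.length : Int)) (v : Int) :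
    l.set i.toNat v
      = PySem.List.slice l none (some i) ++ [v] ++ PySem.List.slice l (some (i + 1)) none := by
  rw [PySem.List.slice_to _ h0, PySem.List.slice_from _ (by omega)]
  rw [List.set_eq_take_append_cons_drop, if_pos (by omega)]
  have h2 : (i + 1).toNat = i.toNat + 1 := by omega
  rw [h2]
  simp

-- A's successor-building loop produces exactly Source B's candidate list
theorem cands_eq (curr : List Int) (sx : Int) :
    (PySem.List.pyRange 0 (curr.length : Int)).foldl (fun acc i =>
      if i = sx then acc
      else
        let acc := if PySem.List.pyGetD curr i 0 > 0
          then acc ++ [curr.set i.toNat (PySem.List.pyGetD curr i 0 - 1)] else acc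
        if PySem.List.pyGetD curr i 0 < (curr.length : Int) - 1
          then acc ++ [curr.set i.toNat (PySem.List.pyGetD curr i 0 + 1)] else acc) []
    = candsB curr sx := by
  simp only [candsB]
  apply PySem.List.foldl_congr_mem
  intro acc i hi
  obtain ⟨hi0, hi1⟩ := PySem.List.mem_pyRange_one.mp hi
  by_cases hisx : i = sx
  · rw [if_pos hisx, if_neg (by simpa using hisx)]
  · rw [if_neg hisx, if_pos hisx]
    rw [set_eq_slices curr i hi0 hi1, set_eq_slices curr i hi0 hi1]

-- transfer of the sorted call in the port (core List LT instances) to the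
-- LinearOrder instances PySem's sorted_pairwise is stated with
theorem sorted_inst (p : List (List Int)) :
    PySem.List.sorted p (fun s => s)
      = @PySem.List.sorted (List ℤ) (List ℤ) List.instLinearOrder.toLT LinearOrder.toDecidableLT p (fun s => s) false := by
  have h2 : (fun (a b : List ℤ) => a.decidableLT b) = (LinearOrder.toDecidableLT (α := List ℤ)) := by
    funext a b; exact Subsingleton.elim _ _
  rw [show (PySem.List.sorted p (fun s : List ℤ => s)) = @PySem.List.sorted (List ℤ) (List ℤ) List.instLT (fun a b => a.decidableLT b) p (fun s => s) false from rfl]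
  congr 1

-- head of the Python-sorted tie list is a least element
theorem sorted_head (p : List (List Int)) (hp : p ≠ []) :
    ∃ h t, PySem.List.sorted p (fun s => s) = h :: t ∧ h ∈ p ∧ ∀ y ∈ p, h ≤ y := by
  rcases hs : PySem.List.sorted p (fun s => s) with _ | ⟨h, t⟩
  · exact absurd ((PySem.List.sorted_eq_nil_iff p (fun s => s) false).mp hs) hp
  · refine ⟨h, t, rfl, ?_, ?_⟩
    · have := PySem.List.sorted_perm p (fun s : List Int => s) false
      rw [hs] at this
      exact this.mem_iff.mp List.mem_cons_self
    · intro y hy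
      have hperm := PySem.List.sorted_perm p (fun s : List Int => s) false
      rw [hs] at hperm
      have hy' : y ∈ h :: t := hperm.mem_iff.mpr hy
      have hpw := PySem.List.sorted_pairwise p (fun s : List Int => s)
      rw [← sorted_inst, hs] at hpw
      rcases List.mem_cons.mp hy' with rfl | hy''
      · exact le_refl _
      · exact (List.pairwise_cons.mp hpw).1 y hy''

-- invariant of A's best-successor scan: the tie list is exactly the states of minimal f
theorem scanA (l : List (List Int)) (p0 : List (List Int)) (low0 : Int) :
    l.foldl (fun (acc : List (List Int) × Int) s =>
        if fA s < acc.2 then ([s], fA s)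
        else if fA s = acc.2 then (acc.1 ++ [s], acc.2) else acc) (p0, low0)
      = ((if (l.map fA).foldl min low0 = low0 then p0 else [])
          ++ l.filter (fun s => decide (fA s = (l.map fA).foldl min low0)),
         (l.map fA).foldl min low0) := by
  induction l generalizing p0 low0 with
  | nil => simp
  | cons s t ih =>
    simp only [List.foldl_cons, List.map_cons, List.filter_cons]
    rcases lt_trichotomy (fA s) low0 with h | h | h
    · rw [if_pos h, ih]
      simp only [min_eq_right h.le]
      have hle := (PySem.List.foldl_min_le (t.map fA) (fA s)).1
      have h1 : ¬ (t.map fA).foldl min (fA s) = low0 := by omega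
      by_cases he : (t.map fA).foldl min (fA s) = fA s
      · simp [he]
        intro hc; omega
      · have he' : ¬ (fA s = (t.map fA).foldl min (fA s)) := fun hh => he hh.symm
        simp [he, h1, he']
    · rw [if_neg (by omega), if_pos h, ih]
      simp only [h, min_self]
      by_cases he : (t.map fA).foldl min low0 = low0
      · simp [he]
      · have h2 : ¬ low0 = (t.map fA).foldl min low0 := fun hh => he hh.symm
        have hne : ¬ (fA s = (t.map fA).foldl min low0) := by omega
        simp [he, h2]
    · rw [if_neg (by omega), if_neg (by omega), ih]
      simp only [min_eq_left h.le]
      have hle := (PySem.List.foldl_min_le (t.map fA) low0).1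
      have hne : ¬ (fA s = (t.map fA).foldl min low0) := by omega
      simp [hne]

-- B's running best, written as a fold over states only
def bmin (l : List (List Int)) (b : List Int) : List Int :=
  l.foldl (fun b s => if fB s < fB b ∨ (fB s = fB b ∧ s < b) then s else b) b

theorem bmin_cons (s : List Int) (t : List (List Int)) (b : List Int) :
    bmin (s :: t) b = if fB s < fB b ∨ (fB s = fB b ∧ s < b) then bmin t s else bmin t b := by
  simp only [bmin, List.foldl_cons]
  by_cases h : fB s < fB b ∨ (fB s = fB b ∧ s < b)
  · rw [if_pos h, if_pos h]
  · rw [if_neg h, if_neg h]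

-- B's (best, bestF) pair tracks (bmin, f of bmin)
theorem pairfold (l : List (List Int)) (b : List Int) :
    l.foldl (fun (acc : List Int × Int) s =>
        if fB s < acc.2 ∨ (fB s = acc.2 ∧ s < acc.1) then (s, fB s) else acc) (b, fB b)
      = (bmin l b, fB (bmin l b)) := by
  induction l generalizing b with
  | nil => simp [bmin]
  | cons s t ih =>
    simp only [List.foldl_cons, bmin]
    by_cases h : fB s < fB b ∨ (fB s = fB b ∧ s < b)
    · rw [if_pos h, if_pos h]; exact ih s
    · rw [if_neg h, if_neg h]; exact ih b

-- bmin is a member and is (f, lexicographic)-minimal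
theorem bmin_spec (l : List (List Int)) (b : List Int) :
    bmin l b ∈ b :: l ∧
      ∀ y ∈ b :: l, fB (bmin l b) < fB y ∨ (fB (bmin l b) = fB y ∧ bmin l b ≤ y) := by
  induction l generalizing b with
  | nil => exact ⟨List.mem_singleton.mpr rfl, by rintro y hy; simp at hy; subst hy; simp [bmin]⟩
  | cons s t ih =>
    rw [bmin_cons]
    by_cases h : fB s < fB b ∨ (fB s = fB b ∧ s < b)
    · rw [if_pos h]
      obtain ⟨hmem, hmin⟩ := ih s
      constructor
      · rcases List.mem_cons.mp hmem with h1 | h1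
        · exact List.mem_cons.mpr (Or.inr (List.mem_cons.mpr (Or.inl h1)))
        · exact List.mem_cons.mpr (Or.inr (List.mem_cons.mpr (Or.inr h1)))
      · intro y hy
        rcases List.mem_cons.mp hy with rfl | hy'
        · have hs := hmin s List.mem_cons_self
          rcases h with h | ⟨h1, h2⟩
          · rcases hs with hs | ⟨hs1, hs2⟩
            · exact Or.inl (lt_trans hs h)
            · exact Or.inl (by omega)
          · rcases hs with hs | ⟨hs1, hs2⟩
            · exact Or.inl (by omega)
            · exact Or.inr ⟨by omega, le_trans hs2 h2.le⟩
        · exact hmin y hy'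
    · rw [if_neg h]
      obtain ⟨hmem, hmin⟩ := ih b
      push Not at h
      constructor
      · rcases List.mem_cons.mp hmem with h1 | h1
        · exact List.mem_cons.mpr (Or.inl h1)
        · exact List.mem_cons.mpr (Or.inr (List.mem_cons.mpr (Or.inr h1)))
      · intro y hy
        rcases List.mem_cons.mp hy with rfl | hy'
        · exact hmin y List.mem_cons_self
        · rcases List.mem_cons.mp hy' with rfl | hy''
          · have hb := hmin b List.mem_cons_self
            have h2 := h.2
            rcases lt_trichotomy (fB b) (fB y) with hf | hf | hf
            · rcases hb with hb | ⟨hb1, hb2⟩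
              · exact Or.inl (lt_trans hb hf)
              · exact Or.inl (by omega)
            · have hby : b ≤ y := by
                by_contra hc
                push Not at hc
                exact absurd (h2 hf.symm) (not_le.mpr hc)
              rcases hb with hb | ⟨hb1, hb2⟩
              · exact Or.inl (by omega)
              · exact Or.inr ⟨by omega, le_trans hb2 hby⟩
            · exact absurd hf (not_lt.mpr h.1)
          · exact hmin y (List.mem_cons.mpr (Or.inr hy''))

-- the main-case glue: A's "sort the tie list and take its head" equals B's running best
theorem main_case (curr : List Int) (C : List (List Int)) :
    PySem.List.pyGet? (PySem.List.sorted
      ((if ((PySem.List.sorted C (fun s => s)).map fB).foldl min (fB curr) = fB curr then [curr] else [])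
        ++ (PySem.List.sorted C (fun s => s)).filter
            (fun s => decide (fB s = ((PySem.List.sorted C (fun s => s)).map fB).foldl min (fB curr))))
      (fun s => s)) 0
    = some (bmin C curr) := by
  set S' := PySem.List.sorted C (fun s : List Int => s) with hS'
  set M := (S'.map fB).foldl min (fB curr) with hM
  set P := (if M = fB curr then [curr] else []) ++ S'.filter (fun s => decide (fB s = M)) with hP
  have hperm : S'.Perm C := PySem.List.sorted_perm C (fun s => s) false
  have hMle := PySem.List.foldl_min_le (S'.map fB) (fB curr)
  set V := bmin C curr with hV
  obtain ⟨hVmem, hVmin⟩ := bmin_spec C curr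
  rw [← hV] at hVmem hVmin
  -- f of the best equals the minimum M
  have hfV : fB V = M := by
    have hub : M ≤ fB V := by
      rcases List.mem_cons.mp hVmem with he | hvc
      · rw [he]; exact hMle.1
      · exact hMle.2 (fB V) (List.mem_map_of_mem (hperm.mem_iff.mpr hvc))
    have hlb : fB V ≤ M := by
      rcases PySem.List.foldl_min_mem (S'.map fB) (fB curr) with he | he
      · rw [hM, he]
        rcases hVmin curr List.mem_cons_self with h | h
        · exact h.le
        · exact h.1.le
      · obtain ⟨s, hs, hfs⟩ := List.mem_map.mp he
        have hsc : s ∈ curr :: C := List.mem_cons.mpr (Or.inr (hperm.mem_iff.mp hs))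
        rw [hM, ← hfs]
        rcases hVmin s hsc with h | h
        · exact h.le
        · exact h.1.le
    omega
  -- the best is in the tie list
  have hVP : V ∈ P := by
    rw [hP]
    rcases List.mem_cons.mp hVmem with he | hvc
    · have hMc : M = fB curr := by rw [← hfV, he]
      rw [if_pos hMc]
      exact List.mem_append.mpr (Or.inl (by rw [he]; exact List.mem_cons_self))
    · refine List.mem_append.mpr (Or.inr ?_)
      exact List.mem_filter.mpr ⟨hperm.mem_iff.mpr hvc, by simp [hfV]⟩
  -- everything in the tie list is a candidate of f-value M
  have hPsub : ∀ y ∈ P, y ∈ curr :: C ∧ fB y = M := by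
    intro y hy
    rw [hP] at hy
    rcases List.mem_append.mp hy with hy1 | hy2
    · by_cases hMc : M = fB curr
      · rw [if_pos hMc] at hy1
        rcases List.mem_cons.mp hy1 with rfl | h
        · exact ⟨List.mem_cons_self, hMc.symm⟩
        · simp at h
      · rw [if_neg hMc] at hy1; simp at hy1
    · obtain ⟨hyS, hyM⟩ := List.mem_filter.mp hy2
      exact ⟨List.mem_cons.mpr (Or.inr (hperm.mem_iff.mp hyS)), by simpa using hyM⟩
  have hPne : P ≠ [] := fun he => by rw [he] at hVP; simp at hVP
  obtain ⟨h, t, hs, hmem, hmin⟩ := sorted_head P hPne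
  rw [hs]
  have hhV : h = V := by
    obtain ⟨hhc, hhM⟩ := hPsub h hmem
    have h1 : h ≤ V := hmin V hVP
    have h2 : V ≤ h := by
      rcases hVmin h hhc with hlt | hle
      · omega
      · exact hle.2
    exact le_antisymm h1 h2
  rw [hhV]
  simp [PySem.List.pyGet?, PySem.List.pyIdx?]

-- ===== VERDICT (by name: the statement is the Claim_ definition above) =====
theorem choose_next_spec : Claim_equal_choose_next := by
  intro curr static_x static_y hdom hpre
  unfold Spec_choose_next
  obtain ⟨v, hv⟩ := pre_get curr static_x hpre.1 hpre.2
  unfold choose_next choose_next_alt succA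
  rw [hv]
  simp only []
  by_cases hvy : v ≠ static_y
  · rw [if_pos hvy, if_pos hvy]
    simp
  · rw [if_neg hvy, if_neg hvy]
    rw [cands_eq curr static_x]
    set C := candsB curr static_x with hCdef
    by_cases hC : C = []
    · rw [if_pos hC, hC]
      simp
    · rw [if_neg hC]
      have hS : PySem.List.sorted C (fun s => s) ≠ [] := by
        intro he
        exact hC ((PySem.List.sorted_eq_nil_iff _ _ _).mp he)
      rw [if_neg (fun hlen => hS (List.length_eq_zero_iff.mp hlen))]
      rw [scanA, pairfold]
      simp only [show fA = fB from funext f_eq]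
      exact main_case curr C
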